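-- pv_equiv track=rewrite | github.com/limonspb/freedom-spec-experiments | find_step.py | find_step_down_index
-- ===== SOURCE A (Python) =====
-- def find_step_down_index(data, step_number):
--     index = 0
--     current_step_number = 0
--     is_currently_up = False
--
--     for value in data:
--         if value < 1500 and is_currently_up:
--             is_currently_up = False
--             if current_step_number == step_number:
--                 break
--             else:
--                 current_step_number += 1
--
--         if value > 1500:
--             is_currently_up = True
--
--         index += 1
--
--     return index
-- ===== SOURCE B (Python) =====
-- def find_step_down_index(data, step_number):
--     # One pass: record the index of every down-step crossing below 1500,
--     # then select the requested one (or len(data) if out of range).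
--     crossings = []
--     is_up = False
--     for i, value in enumerate(data):
--         if value < 1500 and is_up:
--             is_up = False
--             crossings.append(i)
--         elif value > 1500:
--             is_up = True
--     if 0 <= step_number < len(crossings):
--         return crossings[step_number]
--     return len(data)
-- ===== Notes on version B (the rewrite author's own statement) =====
-- stated objective: alternative
-- what changed: Replaces A's count-and-break scan carrying a step counter with a build-the-table-of-crossing-indices pass followed by a bounds-checked selection.
import Mathlib
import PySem

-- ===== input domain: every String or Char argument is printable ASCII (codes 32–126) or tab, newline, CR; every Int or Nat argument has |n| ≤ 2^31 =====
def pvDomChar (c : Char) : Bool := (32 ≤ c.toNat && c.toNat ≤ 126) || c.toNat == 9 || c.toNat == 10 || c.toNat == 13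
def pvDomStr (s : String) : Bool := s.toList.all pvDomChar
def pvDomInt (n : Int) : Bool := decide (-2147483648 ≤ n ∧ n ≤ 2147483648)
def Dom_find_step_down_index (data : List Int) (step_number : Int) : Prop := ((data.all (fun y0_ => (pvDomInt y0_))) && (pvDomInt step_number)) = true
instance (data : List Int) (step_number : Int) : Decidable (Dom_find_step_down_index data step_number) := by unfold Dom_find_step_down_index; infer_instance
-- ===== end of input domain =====

-- B replaces A's count-and-break scan with a build-the-crossing-index-table pass
-- followed by a bounds-checked selection (alternative decomposition, same cost).

-- ===== PORT A =====
-- A's for-loop with break, as structural recursion over the remaining data,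
-- carrying (index, current_step_number, is_currently_up); break returns index.
def findStepLoopA (step_number : Int) : List Int → Int → Int → Bool → Int
  | [], index, _, _ => index
  | value :: rest, index, csn, isUp =>
    if value < 1500 ∧ isUp then
      if csn = step_number then index
      else
        -- is_currently_up := False; (value > 1500 is impossible here); index += 1
        findStepLoopA step_number rest (index + 1) (csn + 1) false
    else
      findStepLoopA step_number rest (index + 1) csn (if value > 1500 then true else isUp)

def find_step_down_index (data : List Int) (step_number : Int) : Int :=
  findStepLoopA step_number data 0 0 false

-- ===== PORT B =====
-- B's single pass appending crossing indices to `crossings`.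
def findStepLoopB : List Int → Int → Bool → List Int → List Int
  | [], _, _, acc => acc
  | value :: rest, i, isUp, acc =>
    if value < 1500 ∧ isUp then findStepLoopB rest (i + 1) false (acc ++ [i])
    else if value > 1500 then findStepLoopB rest (i + 1) true acc
    else findStepLoopB rest (i + 1) isUp acc

def find_step_down_index_alt (data : List Int) (step_number : Int) : Int :=
  let crossings := findStepLoopB data 0 false []
  if 0 ≤ step_number ∧ step_number < crossings.length then
    (PySem.List.pyGet? crossings step_number).getD data.length
  else
    data.length

-- ===== PRECONDITION & SPEC =====
def Spec_find_step_down_index (data : List Int) (step_number : Int) (out : Int) : Prop := out = find_step_down_index_alt data step_number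
instance (data : List Int) (step_number : Int) (out : Int) : Decidable (Spec_find_step_down_index data step_number out) := by unfold Spec_find_step_down_index; infer_instance

-- ===== CLAIM (what is proved, stated in full; the proofs are below) =====
def Claim_equal_find_step_down_index : Prop := ∀ (data : List Int) (step_number : Int), Dom_find_step_down_index data step_number → Spec_find_step_down_index data step_number (find_step_down_index data step_number)

-- ===== LEMMAS AND PROOFS =====

-- the list of crossing indices, without an accumulator (proof-side view of B's loop)
def crossList : List Int → Int → Bool → List Int
  | [], _, _ => []
  | value :: rest, i, isUp =>
    if value < 1500 ∧ isUp then i :: crossList rest (i + 1) false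
    else if value > 1500 then crossList rest (i + 1) true
    else crossList rest (i + 1) isUp

theorem findStepLoopB_eq_crossList (data : List Int) : ∀ (i : Int) (isUp : Bool) (acc : List Int),
    findStepLoopB data i isUp acc = acc ++ crossList data i isUp := by
  induction data with
  | nil => simp [findStepLoopB, crossList]
  | cons v rest ih =>
    intro i isUp acc
    simp only [findStepLoopB, crossList]
    split_ifs <;> simp [ih]

theorem findStepLoopA_eq (step_number : Int) (data : List Int) :
    ∀ (i csn : Int) (isUp : Bool),
    findStepLoopA step_number data i csn isUp =
      (if h : csn ≤ step_number ∧ (step_number - csn).toNat < (crossList data i isUp).length then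
        (crossList data i isUp)[(step_number - csn).toNat]
      else i + data.length) := by
  induction data with
  | nil => intro i csn isUp; simp [findStepLoopA, crossList]
  | cons v rest ih =>
    intro i csn isUp
    simp only [findStepLoopA, crossList]
    by_cases hc : v < 1500 ∧ isUp
    · simp only [if_pos hc]
      by_cases he : csn = step_number
      · rw [if_pos he]
        have h0 : (step_number - csn).toNat = 0 := by omega
        have h2 : csn ≤ step_number ∧ (step_number - csn).toNat < (i :: crossList rest (i + 1) false).length := by
          simp only [List.length_cons]; omega
        rw [dif_pos h2]
        simp [h0]
      · rw [if_neg he, ih]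
        by_cases h1 : csn + 1 ≤ step_number ∧ (step_number - (csn + 1)).toNat < (crossList rest (i + 1) false).length
        · rw [dif_pos h1]
          have h2 : csn ≤ step_number ∧ (step_number - csn).toNat < (i :: crossList rest (i + 1) false).length := by
            simp only [List.length_cons]; omega
          rw [dif_pos h2]
          have h3 : (step_number - csn).toNat = (step_number - (csn + 1)).toNat + 1 := by omega
          simp [h3]
        · rw [dif_neg h1]
          have h2 : ¬ (csn ≤ step_number ∧ (step_number - csn).toNat < (i :: crossList rest (i + 1) false).length) := by
            simp only [List.length_cons]; omega
          rw [dif_neg h2]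
          simp; omega
    · simp only [if_neg hc]
      by_cases hg : v > 1500
      · simp only [if_pos hg, ih]
        split_ifs <;> simp only [List.length_cons] <;> omega
      · simp only [if_neg hg, ih]
        split_ifs <;> simp only [List.length_cons] <;> omega

-- ===== VERDICT (by name: the statement is the Claim_ definition above) =====
theorem find_step_down_index_spec : Claim_equal_find_step_down_index := by
  intro data step_number _
  unfold Spec_find_step_down_index find_step_down_index find_step_down_index_alt
  rw [findStepLoopA_eq, findStepLoopB_eq_crossList]
  simp only [List.nil_append]
  by_cases h : 0 ≤ step_number ∧ step_number < (crossList data 0 false).length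
  · have h' : 0 ≤ step_number ∧ (step_number - 0).toNat < (crossList data 0 false).length := by omega
    rw [dif_pos h', if_pos h]
    rw [PySem.List.pyGet?_of_nonneg _ h.1]
    simp only [Int.sub_zero]
    rw [List.getElem?_eq_getElem (by omega)]
    simp
  · have h' : ¬ (0 ≤ step_number ∧ (step_number - 0).toNat < (crossList data 0 false).length) := by omega
    rw [dif_neg h', if_neg h]
    simp
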